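-- pv_equiv track=rewrite | github.com/JS3322/ing_ai | temp/autoversion_models.py | suggest_bump
-- ===== SOURCE A (Python) =====
-- from typing import Any, Dict, List, Optional, Tuple, Set
--
-- def suggest_bump(prev_fp: Dict[str,str], cur_fp: Dict[str,str]) -> str:
--     # MAJOR by data policy
--     if prev_fp.get("data_hash") != cur_fp.get("data_hash"):
--         return "MAJOR"
--     # MINOR if any of model-facing hashes changed
--     for k in ("schema_hash","arch_hash","weights_hash","behavior_hash"):
--         if prev_fp.get(k) != cur_fp.get(k):
--             return "MINOR"
--     # PATCH if only code changed (or nothing)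
--     if prev_fp.get("code_hash") != cur_fp.get("code_hash"):
--         return "PATCH"
--     return "PATCH"
-- ===== SOURCE B (Python) =====
-- def suggest_bump(prev_fp, cur_fp):
--     diff = {k for k in set(prev_fp) | set(cur_fp)
--             if prev_fp.get(k) != cur_fp.get(k)}
--     if "data_hash" in diff:
--         return "MAJOR"
--     if diff & {"schema_hash", "arch_hash", "weights_hash", "behavior_hash"}:
--         return "MINOR"
--     return "PATCH"
-- ===== Notes on version B (the rewrite author's own statement) =====
-- stated objective: simpler
-- what changed: B computes the set of differing fingerprint keys in one pass and classifies by membership queries on that set, instead of A's per-key guarded early returns; the redundant code_hash branch (both outcomes are PATCH) is dropped.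
import Mathlib
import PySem

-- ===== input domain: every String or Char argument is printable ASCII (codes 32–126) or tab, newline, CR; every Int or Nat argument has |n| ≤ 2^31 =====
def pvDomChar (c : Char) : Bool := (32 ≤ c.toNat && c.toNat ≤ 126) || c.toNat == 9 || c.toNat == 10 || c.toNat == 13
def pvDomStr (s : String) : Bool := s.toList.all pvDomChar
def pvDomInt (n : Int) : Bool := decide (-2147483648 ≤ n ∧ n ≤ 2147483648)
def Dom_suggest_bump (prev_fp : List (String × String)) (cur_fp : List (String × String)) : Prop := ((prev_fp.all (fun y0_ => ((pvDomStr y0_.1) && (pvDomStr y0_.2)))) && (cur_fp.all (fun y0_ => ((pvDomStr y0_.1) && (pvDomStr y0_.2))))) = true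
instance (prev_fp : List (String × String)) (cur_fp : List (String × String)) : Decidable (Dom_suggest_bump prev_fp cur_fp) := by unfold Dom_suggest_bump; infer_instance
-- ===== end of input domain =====

-- B is a simpler re-implementation: it builds the set of differing fingerprint keys once and
-- classifies by membership on that set; A's redundant code_hash branch (both outcomes PATCH) is dropped.

-- ===== PORT A =====
-- A's for-loop with early return, as structural recursion over the key tuple
def pvAnyDiff (d1 d2 : PySem.Dict String String) : List String → Bool
  | [] => false
  | k :: ks => if d1.get? k != d2.get? k then true else pvAnyDiff d1 d2 ks

def suggest_bump (prev_fp : List (String × String)) (cur_fp : List (String × String)) : String :=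
  let d1 := PySem.Dict.ofList prev_fp
  let d2 := PySem.Dict.ofList cur_fp
  if d1.get? "data_hash" != d2.get? "data_hash" then "MAJOR"
  else if pvAnyDiff d1 d2 ["schema_hash", "arch_hash", "weights_hash", "behavior_hash"] then "MINOR"
  else if d1.get? "code_hash" != d2.get? "code_hash" then "PATCH"
  else "PATCH"

-- ===== PORT B =====
def suggest_bump_alt (prev_fp : List (String × String)) (cur_fp : List (String × String)) : String :=
  let d1 := PySem.Dict.ofList prev_fp
  let d2 := PySem.Dict.ofList cur_fp
  let diff : PySem.Set String :=
    (PySem.Set.ofList (d1.keys ++ d2.keys)).filter (fun k => d1.get? k != d2.get? k)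
  if diff.contains "data_hash" then "MAJOR"
  else if PySem.Set.inter diff ["schema_hash", "arch_hash", "weights_hash", "behavior_hash"] ≠ [] then "MINOR"
  else "PATCH"

-- ===== PRECONDITION & SPEC =====
def Spec_suggest_bump (prev_fp : List (String × String)) (cur_fp : List (String × String)) (out : String) : Prop := out = suggest_bump_alt prev_fp cur_fp
instance (prev_fp : List (String × String)) (cur_fp : List (String × String)) (out : String) : Decidable (Spec_suggest_bump prev_fp cur_fp out) := by unfold Spec_suggest_bump; infer_instance

-- ===== CLAIM (what is proved, stated in full; the proofs are below) =====
def Claim_equal_suggest_bump : Prop := ∀ (prev_fp : List (String × String)) (cur_fp : List (String × String)), Dom_suggest_bump prev_fp cur_fp → Spec_suggest_bump prev_fp cur_fp (suggest_bump prev_fp cur_fp)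

-- ===== LEMMAS AND PROOFS =====

-- a key whose lookups differ is in at least one dict's key list
lemma mem_keys_of_get_ne (d1 d2 : PySem.Dict String String) (k : String)
    (h : d1.get? k ≠ d2.get? k) : k ∈ d1.keys ∨ k ∈ d2.keys := by
  by_contra hc
  rw [not_or] at hc
  rw [(PySem.Dict.get?_eq_none_iff_not_mem_keys d1 k).2 hc.1,
      (PySem.Dict.get?_eq_none_iff_not_mem_keys d2 k).2 hc.2] at h
  exact h rfl

lemma mem_diff_iff (d1 d2 : PySem.Dict String String) (k : String) :
    (k ∈ (PySem.Set.ofList (d1.keys ++ d2.keys)).filter (fun k => d1.get? k != d2.get? k)) ↔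
      d1.get? k ≠ d2.get? k := by
  simp only [List.mem_filter, PySem.Set.mem_ofList, List.mem_append, bne_iff_ne]
  constructor
  · exact fun h => h.2
  · exact fun h => ⟨mem_keys_of_get_ne d1 d2 k h, h⟩

-- (verdict below)
lemma bump_eq (d1 d2 : PySem.Dict String String) :
    (if d1.get? "data_hash" != d2.get? "data_hash" then "MAJOR"
     else if pvAnyDiff d1 d2 ["schema_hash", "arch_hash", "weights_hash", "behavior_hash"] then "MINOR"
     else if d1.get? "code_hash" != d2.get? "code_hash" then "PATCH" else "PATCH")
    = (if ((PySem.Set.ofList (d1.keys ++ d2.keys)).filter (fun k => d1.get? k != d2.get? k)).contains "data_hash" then "MAJOR"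
       else if PySem.Set.inter ((PySem.Set.ofList (d1.keys ++ d2.keys)).filter (fun k => d1.get? k != d2.get? k)) ["schema_hash", "arch_hash", "weights_hash", "behavior_hash"] ≠ ([] : List String) then "MINOR"
       else "PATCH") := by
  set diff := (PySem.Set.ofList (d1.keys ++ d2.keys)).filter (fun k => d1.get? k != d2.get? k) with hdiff
  have hmem : ∀ k : String, (k ∈ diff) ↔ d1.get? k ≠ d2.get? k := mem_diff_iff d1 d2
  have b0 : (diff.contains "data_hash") = (d1.get? "data_hash" != d2.get? "data_hash") := by
    rw [Bool.eq_iff_iff, List.contains_iff_mem, hmem, bne_iff_ne]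
  have b1 : pvAnyDiff d1 d2 ["schema_hash", "arch_hash", "weights_hash", "behavior_hash"] = true ↔
      PySem.Set.inter diff ["schema_hash", "arch_hash", "weights_hash", "behavior_hash"] ≠ ([] : List String) := by
    rw [ne_eq, List.eq_nil_iff_forall_not_mem, not_forall]
    simp only [PySem.Set.mem_inter, hmem, pvAnyDiff, List.mem_cons, List.not_mem_nil,
      Bool.if_true_left, Bool.or_eq_true, bne_iff_ne, not_not, or_false,
      Bool.false_eq_true, decide_eq_true_eq]
    constructor
    · rintro (h | h | h | h)
      · exact ⟨"schema_hash", h, Or.inl rfl⟩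
      · exact ⟨"arch_hash", h, Or.inr (Or.inl rfl)⟩
      · exact ⟨"weights_hash", h, Or.inr (Or.inr (Or.inl rfl))⟩
      · exact ⟨"behavior_hash", h, Or.inr (Or.inr (Or.inr rfl))⟩
    · rintro ⟨x, hne, rfl | rfl | rfl | rfl⟩ <;> tauto
  rw [b0]
  by_cases hA : (d1.get? "data_hash" != d2.get? "data_hash") = true
  · rw [if_pos hA, if_pos hA]
  · rw [if_neg hA, if_neg hA]
    by_cases hB : pvAnyDiff d1 d2 ["schema_hash", "arch_hash", "weights_hash", "behavior_hash"] = true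
    · rw [if_pos hB, if_pos (b1.1 hB)]
    · rw [if_neg hB, if_neg (fun hI => hB (b1.2 hI)), ite_self]

theorem suggest_bump_spec : Claim_equal_suggest_bump := by
  intro prev_fp cur_fp _
  exact bump_eq (PySem.Dict.ofList prev_fp) (PySem.Dict.ofList cur_fp)

-- ===== VERDICT (by name: the statement is the Claim_ definition above) =====
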